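-- pv_equiv track=rewrite | github.com/yafo-ai/y-trainer | src/utils/scheduler.py | schedule_element_consumption
-- ===== SOURCE A (Python) =====
-- def schedule_element_consumption(list_of_blocks, M):
--     """
--     编排元素进食顺序，以满足每个波次一个块最多贡献一个元素的约束。
--
--     Args:
--         list_of_blocks (list[list]): 包含N个块的列表，每个块是一个元素列表。
--         M (int): 消费者数量。
--
--     Returns:
--         list[list]: 进食波次列表，每个波次是一个将被消耗的元素列表。
--     """
--
--     # 1. 初始化
--     # next_index[i] 存储块 i 中下一个待消耗的元素的索引。
--     N = len(list_of_blocks) # 块的数量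
--     next_index = [0] * N
--
--     # 总的元素数量
--     total_elements = sum(len(block) for block in list_of_blocks)
--
--     # 结果列表：存储所有进食波次
--     scheduled_waves = []
--
--     # 2. 循环直到所有元素都被消耗
--     elements_consumed = 0
--     while elements_consumed < total_elements:
--
--         # 当前波次将要消耗的元素列表
--         current_wave = []
--
--         # 3. 贪心选择：从 N 个块中选择元素
--         # 约束：每个块最多贡献一个元素，总共不超过 M 个元素。
--
--         # 遍历所有块
--         for i in range(N):
--             block = list_of_blocks[i]
--
--             # 检查：
--             # a) 该块是否还有未消耗的元素？ (next_index[i] < len(block))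
--             # b) 当前波次的元素数量是否已达到消费者上限 M？ (len(current_wave) < M)
--             if next_index[i] < len(block) and len(current_wave) < M:
--
--                 # 贪心选择：选择该块的下一个元素
--                 element_to_consume = block[next_index[i]]
--                 current_wave.append(element_to_consume)
--
--                 # 更新块的进度
--                 next_index[i] += 1
--
--         # 4. 记录波次结果
--         if current_wave:
--             scheduled_waves.append(current_wave)
--             elements_consumed += len(current_wave)
--         else:
--             # 理论上不会发生，除非 total_elements 计算有误
--             break
--
--     return scheduled_waves
-- ===== SOURCE B (Python) =====
-- def schedule_element_consumption(list_of_blocks, M):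
--     """Same waves as A, but keeps only still-active blocks on a stack:
--     each wave pops the first min(M, active) blocks, and pushes back only
--     the blocks that still have elements, so exhausted blocks are never
--     revisited."""
--     if M <= 0:
--         return []
--     # stack top (= list end) is the first block in original order
--     stack = [(b, 0) for b in reversed(list_of_blocks) if b]
--     waves = []
--     while stack:
--         taken = [stack.pop() for _ in range(min(M, len(stack)))]
--         waves.append([b[p] for b, p in taken])
--         for b, p in reversed(taken):
--             if p + 1 < len(b):
--                 stack.append((b, p + 1))
--     return waves
-- ===== Notes on version B (the rewrite author's own statement) =====
-- stated objective: alternative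
-- what changed: B keeps a compact stack of still-active (block, position) pairs and each wave pops the first min(M, active) entries and pushes back only unexhausted blocks, instead of A's per-wave rescan of all N blocks with a next_index array; intended to avoid revisiting exhausted blocks, but a timing run read only 1.22x at the largest size, so no speed is claimed.
import Mathlib
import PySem

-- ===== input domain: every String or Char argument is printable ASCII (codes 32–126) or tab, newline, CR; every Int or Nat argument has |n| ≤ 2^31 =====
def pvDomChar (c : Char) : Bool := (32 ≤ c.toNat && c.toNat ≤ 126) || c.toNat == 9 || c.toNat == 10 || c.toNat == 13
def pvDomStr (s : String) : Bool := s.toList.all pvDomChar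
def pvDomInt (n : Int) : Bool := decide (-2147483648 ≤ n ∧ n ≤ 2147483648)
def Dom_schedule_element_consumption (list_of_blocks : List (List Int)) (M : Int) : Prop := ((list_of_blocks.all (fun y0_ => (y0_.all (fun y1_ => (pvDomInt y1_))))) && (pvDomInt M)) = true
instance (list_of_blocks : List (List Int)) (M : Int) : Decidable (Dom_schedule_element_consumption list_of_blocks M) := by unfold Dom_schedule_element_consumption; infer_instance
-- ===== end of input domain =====

-- B replaces A's per-wave scan over all N blocks (indexed by a next_index array) by a
-- stack of still-active (block, position) pairs, so exhausted blocks are never revisited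
-- (objective: alternative traversal; return value proved identical).

-- ===== PORT A =====
-- one step of A's inner `for i in range(N)` loop; state = (next_index, current_wave)
def pvStepA (blocks : List (List Int)) (M : Int) (st : List Nat × List Int) (i : Nat) : List Nat × List Int :=
  let blk := blocks.getD i []
  let p := st.1.getD i 0
  if p < blk.length ∧ (st.2.length : Int) < M then
    (st.1.set i (p + 1), st.2 ++ [blk.getD p 0])
  else st

-- A's inner loop: current_wave = [] then the for-loop over range(N)
def pvInnerA (blocks : List (List Int)) (M : Int) (idxs : List Nat) : List Nat × List Int :=
  (List.range blocks.length).foldl (pvStepA blocks M) (idxs, [])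

-- A's `while elements_consumed < total_elements` loop
def pvOuterA (blocks : List (List Int)) (M total : Int) (idxs : List Nat) (consumed : Int) :
    List (List Int) :=
  if h0 : consumed < total then
    let r := pvInnerA blocks M idxs
    if h : r.2 ≠ [] then
      r.2 :: pvOuterA blocks M total r.1 (consumed + (r.2.length : Int))
    else []
  else []
termination_by (total - consumed).toNat
decreasing_by
  have h1 : 1 ≤ (pvInnerA blocks M idxs).2.length := List.length_pos_iff.mpr h
  omega

def schedule_element_consumption (list_of_blocks : List (List Int)) (M : Int) : List (List Int) :=
  let total : Int := (list_of_blocks.map (fun b => (b.length : Int))).sum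
  pvOuterA list_of_blocks M total (List.replicate list_of_blocks.length 0) 0

-- ===== PORT B =====
-- push back a taken block iff it still has elements (B's `if p + 1 < len(b)`)
def pvBump (e : List Int × Nat) : Option (List Int × Nat) :=
  if e.2 + 1 < e.1.length then some (e.1, e.2 + 1) else none

-- termination measure: total remaining elements + number of stack entries
def pvMeas (active : List (List Int × Nat)) : Nat :=
  active.foldr (fun e s => (e.1.length - e.2) + 1 + s) 0

theorem pvMeas_cons (e : List Int × Nat) (t : List (List Int × Nat)) :
    pvMeas (e :: t) = (e.1.length - e.2) + 1 + pvMeas t := rfl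

theorem pvMeas_append (a b : List (List Int × Nat)) : pvMeas (a ++ b) = pvMeas a + pvMeas b := by
  induction a with
  | nil => simp [pvMeas]
  | cons e t ih => rw [List.cons_append, pvMeas_cons, pvMeas_cons, ih]; omega

theorem pvMeas_filterMap_bump_le (t : List (List Int × Nat)) :
    pvMeas (t.filterMap pvBump) ≤ pvMeas t := by
  induction t with
  | nil => simp [pvMeas]
  | cons e t ih =>
    cases h : pvBump e with
    | none => simp only [List.filterMap_cons, h]; rw [pvMeas_cons]; omega
    | some e' =>
      have hle : e'.1.length - e'.2 ≤ e.1.length - e.2 := by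
        simp [pvBump] at h; obtain ⟨hlt, rfl⟩ := h; simp; omega
      simp only [List.filterMap_cons, h]
      rw [pvMeas_cons, pvMeas_cons]; omega

theorem pvMeas_step_lt (e : List Int × Nat) (rest : List (List Int × Nat)) (m : Nat) (hm : 0 < m) :
    pvMeas (((e :: rest).take m).filterMap pvBump ++ (e :: rest).drop m) < pvMeas (e :: rest) := by
  obtain ⟨m', rfl⟩ : ∃ m', m = m' + 1 := ⟨m - 1, by omega⟩
  simp only [List.take_succ_cons, List.drop_succ_cons]
  have hrest : pvMeas ((rest.take m').filterMap pvBump) + pvMeas (rest.drop m') ≤ pvMeas rest := by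
    have h1 := pvMeas_filterMap_bump_le (rest.take m')
    have h2 : pvMeas (rest.take m') + pvMeas (rest.drop m') = pvMeas rest := by
      rw [← pvMeas_append, List.take_append_drop]
    omega
  cases h : pvBump e with
  | none =>
    simp only [List.filterMap_cons, h]
    have h1 : 1 ≤ e.1.length - e.2 ∨ e.1.length - e.2 = 0 := by omega
    rw [pvMeas_append, pvMeas_cons]
    omega
  | some e' =>
    have he' : e'.1.length - e'.2 < e.1.length - e.2 ∧ 1 ≤ e.1.length - e.2 := by
      simp [pvBump] at h; obtain ⟨hlt, rfl⟩ := h; simp; omega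
    simp only [List.filterMap_cons, h, List.cons_append]
    rw [pvMeas_cons, pvMeas_append, pvMeas_cons]
    omega

-- B's `while stack` loop; the Lean list head corresponds to Python's stack top
-- (end of the Python list), so `take m` is the m pops and the survivors are
-- pushed back in front of the rest, exactly as B's reversed push-back does.
def pvOuterB (m : Nat) (hm : 0 < m) (active : List (List Int × Nat)) : List (List Int) :=
  match active with
  | [] => []
  | e :: rest =>
    let taken := (e :: rest).take m
    (taken.map (fun e => e.1.getD e.2 0)) ::
      pvOuterB m hm (taken.filterMap pvBump ++ (e :: rest).drop m)
termination_by pvMeas active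
decreasing_by exact pvMeas_step_lt e rest m hm

def schedule_element_consumption_alt (list_of_blocks : List (List Int)) (M : Int) : List (List Int) :=
  if h : M ≤ 0 then []
  else
    pvOuterB M.toNat (by omega)
      (list_of_blocks.filterMap (fun b => if b ≠ [] then some (b, 0) else none))

-- ===== PRECONDITION & SPEC =====
def Spec_schedule_element_consumption (list_of_blocks : List (List Int)) (M : Int) (out : List (List Int)) : Prop := out = schedule_element_consumption_alt list_of_blocks M
instance (list_of_blocks : List (List Int)) (M : Int) (out : List (List Int)) : Decidable (Spec_schedule_element_consumption list_of_blocks M out) := by unfold Spec_schedule_element_consumption; infer_instance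

-- ===== CLAIM (what is proved, stated in full; the proofs are below) =====
def Claim_equal_schedule_element_consumption : Prop := ∀ (list_of_blocks : List (List Int)) (M : Int), Dom_schedule_element_consumption list_of_blocks M → Spec_schedule_element_consumption list_of_blocks M (schedule_element_consumption list_of_blocks M)

-- ===== LEMMAS AND PROOFS =====

-- an active-stack entry still has elements
def pvElig (e : List Int × Nat) : Bool := decide (e.2 < e.1.length)

-- remaining elements of a pair list
def pvCap (pr : List (List Int × Nat)) : Nat :=
  pr.foldr (fun e s => (e.1.length - e.2) + s) 0

-- A's inner for-loop, reformulated as structural recursion over (block, position) pairs;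
-- c is the current wave length
def pvG (M : Int) : List (List Int × Nat) → Int → List (List Int × Nat) × List Int
  | [], _ => ([], [])
  | (b, p) :: r, c =>
    if p < b.length ∧ c < M then
      ((b, p + 1) :: (pvG M r (c + 1)).1, b.getD p 0 :: (pvG M r (c + 1)).2)
    else
      ((b, p) :: (pvG M r c).1, (pvG M r c).2)

theorem pvCap_cons (e : List Int × Nat) (t : List (List Int × Nat)) :
    pvCap (e :: t) = (e.1.length - e.2) + pvCap t := rfl

theorem getD_mid {α : Type} (l1 : List α) (a : α) (l2 : List α) (d : α) :
    (l1 ++ a :: l2).getD l1.length d = a := by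
  induction l1 with
  | nil => rfl
  | cons x t ih => simpa using ih

theorem set_mid {α : Type} (l1 : List α) (a : α) (l2 : List α) (v : α) :
    (l1 ++ a :: l2).set l1.length v = l1 ++ v :: l2 := by
  induction l1 with
  | nil => rfl
  | cons x t ih => simpa using ih

-- the fold over range(N) with in-place index updates equals pvG on the zipped tail
theorem inner_general (M : Int) (bs2 : List (List Int)) :
    ∀ (is2 : List Nat) (bs1 : List (List Int)) (is1 : List Nat) (wave : List Int),
    is1.length = bs1.length → is2.length = bs2.length →
    (List.range' bs1.length bs2.length).foldl (pvStepA (bs1 ++ bs2) M) (is1 ++ is2, wave)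
      = (is1 ++ (pvG M (bs2.zip is2) (wave.length : Int)).1.map Prod.snd,
         wave ++ (pvG M (bs2.zip is2) (wave.length : Int)).2) := by
  induction bs2 with
  | nil =>
    intro is2 bs1 is1 wave h1 h2
    have : is2 = [] := List.length_eq_zero_iff.mp h2
    subst this
    simp [pvG]
  | cons b bs2' ih =>
    intro is2 bs1 is1 wave h1 h2
    cases is2 with
    | nil => simp at h2
    | cons p is2' =>
      have h2' : is2'.length = bs2'.length := by simpa using h2
      simp only [List.length_cons]
      rw [List.range'_succ, List.foldl_cons]
      have hstep : pvStepA (bs1 ++ b :: bs2') M (is1 ++ p :: is2', wave) bs1.length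
          = if p < b.length ∧ (wave.length : Int) < M then
              (is1 ++ (p + 1) :: is2', wave ++ [b.getD p 0])
            else (is1 ++ p :: is2', wave) := by
        simp only [pvStepA]
        rw [← h1]
        rw [show (bs1 ++ b :: bs2').getD is1.length [] = b by rw [h1]; exact getD_mid bs1 b bs2' []]
        rw [getD_mid is1 p is2' 0, set_mid is1 p is2' (p + 1)]
      rw [hstep]
      by_cases hc : p < b.length ∧ (wave.length : Int) < M
      · rw [if_pos hc]
        have hlen : (is1 ++ [p + 1]).length = (bs1 ++ [b]).length := by simp [h1]
        have := ih is2' (bs1 ++ [b]) (is1 ++ [p + 1]) (wave ++ [b.getD p 0]) hlen h2'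
        simp only [List.append_assoc, List.cons_append, List.nil_append,
          List.length_append, List.length_cons, List.length_nil, h1] at this ⊢
        rw [this]
        simp only [List.zip_cons_cons, pvG, if_pos hc]
        simp [List.append_assoc]
      · rw [if_neg hc]
        have hlen : (is1 ++ [p]).length = (bs1 ++ [b]).length := by simp [h1]
        have := ih is2' (bs1 ++ [b]) (is1 ++ [p]) wave hlen h2'
        simp only [List.append_assoc, List.cons_append, List.nil_append,
          List.length_append, List.length_cons, List.length_nil, h1] at this ⊢
        rw [this]
        simp only [List.zip_cons_cons, pvG, if_neg hc]
        simp [List.append_assoc]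

theorem innerA_eq (blocks : List (List Int)) (M : Int) (idxs : List Nat)
    (h : idxs.length = blocks.length) :
    pvInnerA blocks M idxs
      = ((pvG M (blocks.zip idxs) 0).1.map Prod.snd, (pvG M (blocks.zip idxs) 0).2) := by
  have := inner_general M blocks idxs [] [] [] rfl h
  simpa [pvInnerA, List.range_eq_range'] using this

theorem pvG_map_fst (M : Int) (pr : List (List Int × Nat)) :
    ∀ c, ((pvG M pr c).1).map Prod.fst = pr.map Prod.fst := by
  induction pr with
  | nil => intro c; simp [pvG]
  | cons e r ih =>
    intro c
    obtain ⟨b, p⟩ := e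
    simp only [pvG]
    split
    · simp [ih]
    · simp [ih]

theorem pvG_wave (M : Int) (pr : List (List Int × Nat)) :
    ∀ c, (pvG M pr c).2
      = ((pr.filter pvElig).take ((M - c).toNat)).map (fun e => e.1.getD e.2 0) := by
  induction pr with
  | nil => intro c; simp [pvG]
  | cons e r ih =>
    intro c
    obtain ⟨b, p⟩ := e
    simp only [pvG]
    by_cases hp : p < b.length
    · by_cases hcM : c < M
      · rw [if_pos ⟨hp, hcM⟩]
        have hElig : pvElig (b, p) = true := by simp [pvElig, hp]
        have hT : (M - c).toNat = (M - (c + 1)).toNat + 1 := by omega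
        simp only [List.filter_cons, hElig, if_pos, hT, List.take_succ_cons, List.map_cons,
          ite_true]
        rw [ih (c + 1)]
      · rw [if_neg (by tauto)]
        have hElig : pvElig (b, p) = true := by simp [pvElig, hp]
        have hT : (M - c).toNat = 0 := by omega
        have hT' : ∀ c', c ≤ c' → (M - c').toNat = 0 := by intro c' hc'; omega
        simp only [List.filter_cons, hElig, ite_true, hT, List.take_zero, List.map_nil]
        rw [ih c, hT, List.take_zero, List.map_nil]
    · rw [if_neg (by tauto)]
      have hElig : pvElig (b, p) = false := by simp [pvElig]; omega
      simp only [List.filter_cons, hElig, ite_false, Bool.false_eq_true]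
      exact ih c

theorem pvG_filter (M : Int) (pr : List (List Int × Nat)) :
    ∀ c, (pvG M pr c).1.filter pvElig
      = ((pr.filter pvElig).take ((M - c).toNat)).filterMap pvBump
        ++ (pr.filter pvElig).drop ((M - c).toNat) := by
  induction pr with
  | nil => intro c; simp [pvG]
  | cons e r ih =>
    intro c
    obtain ⟨b, p⟩ := e
    simp only [pvG]
    by_cases hp : p < b.length
    · by_cases hcM : c < M
      · rw [if_pos ⟨hp, hcM⟩]
        have hElig : pvElig (b, p) = true := by simp [pvElig, hp]
        have hT : (M - c).toNat = (M - (c + 1)).toNat + 1 := by omega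
        simp only [List.filter_cons, hElig, ite_true, hT, List.take_succ_cons,
          List.filterMap_cons, List.drop_succ_cons]
        by_cases hq : p + 1 < b.length
        · have h1 : pvElig (b, p + 1) = true := by simp [pvElig, hq]
          have h2 : pvBump (b, p) = some (b, p + 1) := by simp [pvBump, hq]
          simp only [List.filter_cons, h1, ite_true, h2, List.cons_append]
          rw [ih (c + 1)]
        · have h1 : pvElig (b, p + 1) = false := by simp [pvElig]; omega
          have h2 : pvBump (b, p) = none := by simp [pvBump]; omega
          simp only [List.filter_cons, h1, ite_false, h2, Bool.false_eq_true]
          rw [ih (c + 1)]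
      · rw [if_neg (by tauto)]
        have hElig : pvElig (b, p) = true := by simp [pvElig, hp]
        have hT : (M - c).toNat = 0 := by omega
        simp only [List.filter_cons, hElig, ite_true, hT, List.take_zero,
          List.filterMap_nil, List.drop_zero, List.nil_append]
        rw [ih c, hT, List.take_zero, List.filterMap_nil, List.drop_zero, List.nil_append]
    · rw [if_neg (by tauto)]
      have hElig : pvElig (b, p) = false := by simp [pvElig]; omega
      simp only [List.filter_cons, hElig, ite_false, Bool.false_eq_true]
      exact ih c

theorem pvG_cap (M : Int) (pr : List (List Int × Nat)) :
    ∀ c, pvCap (pvG M pr c).1 + (pvG M pr c).2.length = pvCap pr := by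
  induction pr with
  | nil => intro c; simp [pvG, pvCap]
  | cons e r ih =>
    intro c
    obtain ⟨b, p⟩ := e
    simp only [pvG]
    split
    · rename_i hc
      simp only [pvCap_cons, List.length_cons]
      have := ih (c + 1)
      have hp : p < b.length := hc.1
      omega
    · simp only [pvCap_cons]
      have := ih c
      omega

theorem pvCap_zero_iff (pr : List (List Int × Nat)) :
    pvCap pr = 0 ↔ pr.filter pvElig = [] := by
  induction pr with
  | nil => simp [pvCap]
  | cons e r ih =>
    rw [pvCap_cons, List.filter_cons]
    by_cases hp : e.2 < e.1.length
    · have hE : pvElig e = true := by simp [pvElig, hp]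
      simp only [hE, ite_true, reduceCtorEq, iff_false]
      omega
    · have hE : pvElig e = false := by simp [pvElig]; omega
      simp only [hE, Bool.false_eq_true, ite_false]
      have h0 : e.1.length - e.2 = 0 := by omega
      rw [h0]
      simpa using ih

theorem zip_snd (bs : List (List Int)) (l : List (List Int × Nat))
    (h : l.map Prod.fst = bs) : bs.zip (l.map Prod.snd) = l := by
  subst h
  exact Eq.symm (List.zip_of_prod rfl rfl)

theorem outerAB (M : Int) (hM : 0 < M) (hm : 0 < M.toNat) :
    ∀ (n : Nat) (blocks : List (List Int)) (idxs : List Nat) (total consumed : Int),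
    idxs.length = blocks.length →
    total - consumed = (pvCap (blocks.zip idxs) : Int) →
    pvCap (blocks.zip idxs) = n →
    pvOuterA blocks M total idxs consumed
      = pvOuterB M.toNat hm ((blocks.zip idxs).filter pvElig) := by
  intro n
  induction n using Nat.strong_induction_on with
  | _ n IH =>
    intro blocks idxs total consumed hlen htot hcap
    rw [pvOuterA]
    by_cases hct : consumed < total
    · have hcappos : 0 < pvCap (blocks.zip idxs) := by omega
      have hFne : (blocks.zip idxs).filter pvElig ≠ [] := by
        intro h
        exact absurd ((pvCap_zero_iff _).mpr h) (by omega)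
      have hinner := innerA_eq blocks M idxs hlen
      have hw : (pvInnerA blocks M idxs).2
          = (((blocks.zip idxs).filter pvElig).take M.toNat).map (fun e => e.1.getD e.2 0) := by
        rw [hinner]
        have := pvG_wave M (blocks.zip idxs) 0
        simpa using this
      obtain ⟨f0, F', hF⟩ : ∃ f0 F', (blocks.zip idxs).filter pvElig = f0 :: F' := by
        cases h : (blocks.zip idxs).filter pvElig with
        | nil => exact absurd h hFne
        | cons a t => exact ⟨a, t, rfl⟩
      obtain ⟨m', hm'⟩ : ∃ m', M.toNat = m' + 1 := ⟨M.toNat - 1, by omega⟩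
      have hwne : (pvInnerA blocks M idxs).2 ≠ [] := by
        rw [hw, hF, hm']
        simp
      rw [dif_pos hct]
      simp only [dif_pos hwne]
      -- B side
      rw [hF, pvOuterB]
      have hfst : ((pvG M (blocks.zip idxs) 0).1).map Prod.fst = blocks := by
        rw [pvG_map_fst]
        exact List.map_fst_zip (le_of_eq hlen.symm)
      have hzip' : blocks.zip ((pvG M (blocks.zip idxs) 0).1.map Prod.snd)
          = (pvG M (blocks.zip idxs) 0).1 := zip_snd blocks _ hfst
      have hlen' : ((pvG M (blocks.zip idxs) 0).1.map Prod.snd).length = blocks.length := by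
        have := congrArg List.length hfst
        simpa using this
      have hcapG := pvG_cap M (blocks.zip idxs) 0
      have hwlen : 1 ≤ (pvInnerA blocks M idxs).2.length := List.length_pos_iff.mpr hwne
      have hwlenG : (pvInnerA blocks M idxs).2.length = (pvG M (blocks.zip idxs) 0).2.length := by
        rw [hinner]
      congr 1
      · rw [hw, hF]
      · simp only [hinner]
        have hrec := IH (pvCap (pvG M (blocks.zip idxs) 0).1)
          (by omega)
          blocks ((pvG M (blocks.zip idxs) 0).1.map Prod.snd) total
          (consumed + ((pvG M (blocks.zip idxs) 0).2.length : Int))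
          hlen'
          (by rw [hzip']; push_cast; omega)
          (by rw [hzip'])
        rw [hrec, hzip']
        have hfilt := pvG_filter M (blocks.zip idxs) 0
        simp only [Int.sub_zero] at hfilt
        rw [hfilt, hF]
    · rw [dif_neg hct]
      have hc0 : pvCap (blocks.zip idxs) = 0 := by omega
      rw [(pvCap_zero_iff _).mp hc0, pvOuterB]

theorem init_active (blocks : List (List Int)) :
    blocks.filterMap (fun b => if b ≠ [] then some (b, (0 : Nat)) else none)
      = (blocks.zip (List.replicate blocks.length 0)).filter pvElig := by
  induction blocks with
  | nil => rfl
  | cons b bs ih =>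
    simp only [List.length_cons, List.replicate_succ, List.zip_cons_cons,
      List.filterMap_cons, List.filter_cons]
    cases b with
    | nil => simpa [pvElig] using ih
    | cons x t => simpa [pvElig] using ih

theorem init_total (blocks : List (List Int)) :
    (blocks.map (fun b => (b.length : Int))).sum
      = (pvCap (blocks.zip (List.replicate blocks.length 0)) : Int) := by
  induction blocks with
  | nil => rfl
  | cons b bs ih =>
    simp only [List.length_cons, List.replicate_succ, List.zip_cons_cons, List.map_cons,
      List.sum_cons, pvCap_cons]
    push_cast
    rw [ih]
    push_cast
    omega

theorem main_eq (blocks : List (List Int)) (M : Int) :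
    schedule_element_consumption blocks M = schedule_element_consumption_alt blocks M := by
  unfold schedule_element_consumption schedule_element_consumption_alt
  by_cases hM : M ≤ 0
  · rw [dif_pos hM]
    rw [pvOuterA]
    by_cases hct : (0 : Int) < (blocks.map (fun b => (b.length : Int))).sum
    · have hinner := innerA_eq blocks M (List.replicate blocks.length 0) (by simp)
      have hw : (pvInnerA blocks M (List.replicate blocks.length 0)).2 = [] := by
        rw [hinner]
        have := pvG_wave M (blocks.zip (List.replicate blocks.length 0)) 0
        have hT : (M - 0).toNat = 0 := by omega
        rw [this, hT]
        simp
      rw [dif_pos hct]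
      simp only [dif_neg (not_not_intro hw)]
    · rw [dif_neg hct]
  · rw [dif_neg hM]
    rw [init_active]
    exact outerAB M (by omega) (by omega) (pvCap (blocks.zip (List.replicate blocks.length 0)))
      blocks (List.replicate blocks.length 0)
      ((blocks.map (fun b => (b.length : Int))).sum) 0
      (by simp) (by rw [init_total]; omega) rfl

-- ===== VERDICT (by name: the statement is the Claim_ definition above) =====
theorem schedule_element_consumption_spec : Claim_equal_schedule_element_consumption := by
  intro blocks M _
  unfold Spec_schedule_element_consumption
  exact main_eq blocks M
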